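-- pv_equiv track=rewrite | github.com/bashbash96/InterviewPreparation | Cracking The Coding Interview/Moderate.py | pondSizes
-- ===== SOURCE A (Python) =====
-- def pondSizes(mat):
--     if len(mat) == 0:
--         return -1
--
--     res = []
--     visited = [[False for j in range(len(mat[0]))] for i in range(len(mat))]
--
--     for row in range(len(mat)):
--         for col in range(len(mat[0])):
--             if not visited[row][col] and mat[row][col] == 0:
--                 res.append(calculateSize(mat, row, col, visited))
--     return res
--
-- def calculateSize(mat, row, col, visited):
--     if row < 0 or col < 0 or row >= len(mat) or col >= len(mat[0]) or visited[row][col] or mat[row][col] != 0: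
--         return 0
--     visited[row][col] = True
--
--     size = 1
--     for nextRow in range(-1, 2):
--         for nextCol in range(-1, 2):
--             size += calculateSize(mat, row + nextRow, col + nextCol, visited)
--
--     return size
-- ===== SOURCE B (Python) =====
-- def pondSizes(mat):
--     if len(mat) == 0:
--         return -1
--
--     rows, cols = len(mat), len(mat[0])
--     res = []
--     visited = set()
--
--     for row in range(rows):
--         for col in range(cols):
--             if (row, col) not in visited and mat[row][col] == 0:
--                 size = 0
--                 stack = [(row, col)]
--                 while stack:
--                     r, c = stack.pop()
--                     if r < 0 or c < 0 or r >= rows or c >= cols or (r, c) in visited or mat[r][c] != 0: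
--                         continue
--                     visited.add((r, c))
--                     size += 1
--                     for dr in (1, 0, -1):
--                         for dc in (1, 0, -1):
--                             stack.append((r + dr, c + dc))
--                 res.append(size)
--     return res
-- ===== Notes on version B (the rewrite author's own statement) =====
-- stated objective: idiomatic
-- what changed: The recursive 9-way flood fill (calculateSize, mutating a boolean visited matrix) is replaced by an iterative flood fill with an explicit stack and a visited set of coordinate pairs, avoiding deep recursion.
-- outside the precondition, e.g. on pondSizes([]): A returns -1, B returns -1
import Mathlib
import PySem

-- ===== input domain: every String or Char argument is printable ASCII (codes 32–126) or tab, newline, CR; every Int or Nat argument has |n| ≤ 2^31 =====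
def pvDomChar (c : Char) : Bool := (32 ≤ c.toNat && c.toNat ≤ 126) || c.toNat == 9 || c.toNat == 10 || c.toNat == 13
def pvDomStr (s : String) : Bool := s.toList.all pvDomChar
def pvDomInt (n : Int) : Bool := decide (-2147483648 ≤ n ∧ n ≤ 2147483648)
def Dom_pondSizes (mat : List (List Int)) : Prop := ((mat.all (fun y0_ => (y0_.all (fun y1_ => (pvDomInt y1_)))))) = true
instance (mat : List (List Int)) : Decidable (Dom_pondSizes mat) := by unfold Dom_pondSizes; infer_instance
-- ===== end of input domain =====

-- B replaces A's recursive 9-way flood fill over a mutated boolean visited matrix by an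
-- iterative flood fill with an explicit stack and a visited set of coordinate pairs.
-- A mutates no argument; equivalence is about the return value.

-- ===== PORT A =====
-- visited[r][c] (read after the in-range guard in Python, so the total getD is exact there)
def pvVisGet (v : List (List Bool)) (r c : Int) : Bool :=
  (v.getD r.toNat []).getD c.toNat false

-- visited[r][c] = True
def pvVisSet (v : List (List Bool)) (r c : Int) : List (List Bool) :=
  v.modify r.toNat (fun row => row.set c.toNat true)

-- the guard of calculateSize, in A's order
def pvBadA (mat : List (List Int)) (r c : Int) (v : List (List Bool)) : Bool :=
  decide (r < 0) || decide (c < 0) || decide ((mat.length : Int) ≤ r) ||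
    decide (((mat.headD []).length : Int) ≤ c) || pvVisGet v r c ||
    decide ((mat.getD r.toNat []).getD c.toNat 0 ≠ 0)

-- calculateSize: Python's unbounded recursion carries the mutated `visited` as state; the
-- fuel is an artifact of totality — pondSizes passes rows*cols, and the proofs below show
-- the fuel-0 branch agrees because every recursive level marks one more unvisited cell.
def calculateSize (mat : List (List Int)) (fuel : Nat) (row col : Int)
    (v : List (List Bool)) : Int × List (List Bool) :=
  match fuel with
  | 0 => (0, v)
  | f + 1 =>
    if pvBadA mat row col v then (0, v)
    else
      let v1 := pvVisSet v row col
      -- size = 1; for nextRow in range(-1,2): for nextCol in range(-1,2): size += calculateSize(...)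
      (PySem.List.pyRange (-1) 2 1).foldl (fun acc dr =>
        (PySem.List.pyRange (-1) 2 1).foldl (fun acc dc =>
          let p := calculateSize mat f (row + dr) (col + dc) acc.2
          (acc.1 + p.1, p.2)) acc) (1, v1)

def pondSizes (mat : List (List Int)) : List Int :=
  if mat.length = 0 then []   -- Python returns -1 (an int, not a list) here; excluded by Pre_
  else
    let rows := mat.length
    let cols := (mat.headD []).length
    let visited := (PySem.List.pyRange 0 (rows : Int) 1).map (fun _ =>
      (PySem.List.pyRange 0 (cols : Int) 1).map (fun _ => false))
    let fin := (PySem.List.pyRange 0 (rows : Int) 1).foldl (fun st row =>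
      (PySem.List.pyRange 0 (cols : Int) 1).foldl (fun st col =>
        if !pvVisGet st.2 row col && ((mat.getD row.toNat []).getD col.toNat 0 == 0) then
          let p := calculateSize mat (rows * cols) row col st.2
          (st.1 ++ [p.1], p.2)
        else st) st) (([] : List Int), visited)
    fin.1

-- ===== PORT B =====
-- the guard of the while-loop body, in B's order
def pvBadB (mat : List (List Int)) (r c : Int) (s : PySem.Set (Int × Int)) : Bool :=
  decide (r < 0) || decide (c < 0) || decide ((mat.length : Int) ≤ r) ||
    decide (((mat.headD []).length : Int) ≤ c) || PySem.Set.contains s (r, c) ||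
    decide ((mat.getD r.toNat []).getD c.toNat 0 ≠ 0)

-- all grid coordinates; used only as the termination measure of the while loop
def pvCellsB (mat : List (List Int)) : List (Int × Int) :=
  (List.range mat.length).flatMap (fun i =>
    (List.range (mat.headD []).length).map (fun j => ((i : Int), (j : Int))))

def pvUnmarked (mat : List (List Int)) (s : PySem.Set (Int × Int)) : Nat :=
  (pvCellsB mat).countP (fun p => !PySem.Set.contains s p)

lemma pv_countP_lt {α : Type} {l : List α} {p q : α → Bool}
    (hmono : ∀ a ∈ l, q a = true → p a = true) {x : α} (hx : x ∈ l)
    (hp : p x = true) (hq : q x = false) : l.countP q < l.countP p := by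
  induction l with
  | nil => cases hx
  | cons y l ih =>
    rcases List.mem_cons.1 hx with rfl | hx'
    · simp only [List.countP_cons, hp, hq]
      have := List.countP_mono_left (l := l) (p := q) (q := p)
        (fun a ha h => hmono a (List.mem_cons_of_mem _ ha) h)
      simp only [if_true, Bool.false_eq_true, if_false]
      omega
    · have h1 := hmono y (List.mem_cons_self) 
      simp only [List.countP_cons]
      rcases hqy : q y with _ | _
      · have := ih (fun a ha h => hmono a (List.mem_cons_of_mem _ ha) h) hx'
        rcases hpy : p y <;> simp <;> omega
      · have hpy := h1 hqy
        have := ih (fun a ha h => hmono a (List.mem_cons_of_mem _ ha) h) hx'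
        simp [hpy]; omega

lemma pv_mem_cellsB {mat : List (List Int)} {r c : Int}
    (hr0 : 0 ≤ r) (hr : r < (mat.length : Int)) (hc0 : 0 ≤ c)
    (hc : c < ((mat.headD []).length : Int)) : (r, c) ∈ pvCellsB mat := by
  simp only [pvCellsB, List.mem_flatMap, List.mem_map]
  refine ⟨r, ?_, c, ?_, rfl⟩ <;>
    · simp only [List.pure_def, List.bind_eq_flatMap, List.mem_flatMap, List.mem_range,
        List.mem_cons, List.not_mem_nil, or_false]
      exact ⟨_, by omega, (Int.toNat_of_nonneg (by omega)).symm⟩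

-- marking an in-range, unmarked cell strictly decreases the unmarked count (termination)
lemma pv_unmarked_add_lt {mat : List (List Int)} {s : PySem.Set (Int × Int)} {r c : Int}
    (hbad : pvBadB mat r c s = false) :
    pvUnmarked mat (PySem.Set.add s (r, c)) < pvUnmarked mat s := by
  simp only [pvBadB, Bool.or_eq_false_iff, decide_eq_false_iff_not, not_lt, not_le,
    not_not] at hbad
  obtain ⟨⟨⟨⟨⟨hr0, hc0⟩, hr⟩, hc⟩, hmem⟩, -⟩ := hbad
  have hnot : (r, c) ∉ s := fun hmm => by
    rw [(PySem.Set.contains_iff s (r, c)).2 hmm] at hmem; cases hmem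
  refine pv_countP_lt ?_ (pv_mem_cellsB hr0 hr hc0 hc) (by simpa using hnot)
    (by simp [PySem.Set.mem_add])
  intro a _ h
  simp only [Bool.not_eq_true', ← Bool.not_eq_true] at h ⊢
  clear hnot
  simp only [PySem.Set.contains_eq_listContains] at h ⊢
  simp only [List.contains_eq_mem, decide_eq_true_eq,
    PySem.Set.mem_add] at h ⊢
  exact fun hmm => h (Or.inl hmm)

-- while stack: pop from the head (the head models the END of the Python list)
def pondLoop (mat : List (List Int)) (visited : PySem.Set (Int × Int)) (size : Int)
    (st : List (Int × Int)) : Int × PySem.Set (Int × Int) :=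
  match st with
  | [] => (size, visited)
  | (r, c) :: rest =>
    if h : pvBadB mat r c visited then pondLoop mat visited size rest
    else
      pondLoop mat (PySem.Set.add visited (r, c)) (size + 1)
        -- for dr in (1,0,-1): for dc in (1,0,-1): stack.append((r+dr, c+dc))
        (([(1 : Int), 0, -1]).foldl (fun st dr =>
          ([(1 : Int), 0, -1]).foldl (fun st dc => (r + dr, c + dc) :: st) st) rest)
termination_by (pvUnmarked mat visited, st.length)
decreasing_by
  · exact Prod.Lex.right _ (by simp)
  · exact Prod.Lex.left _ _ (pv_unmarked_add_lt (by simpa using h))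

def pondSizes_alt (mat : List (List Int)) : List Int :=
  if mat.length = 0 then []   -- Python returns -1 (an int, not a list) here; excluded by Pre_
  else
    let rows := mat.length
    let cols := (mat.headD []).length
    let fin := (PySem.List.pyRange 0 (rows : Int) 1).foldl (fun st row =>
      (PySem.List.pyRange 0 (cols : Int) 1).foldl (fun st col =>
        if !PySem.Set.contains st.2 (row, col) &&
            ((mat.getD row.toNat []).getD col.toNat 0 == 0) then
          let p := pondLoop mat st.2 0 [(row, col)]
          (st.1 ++ [p.1], p.2)
        else st) st) (([] : List Int), (PySem.Set.empty : PySem.Set (Int × Int)))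
    fin.1

-- ===== PRECONDITION & SPEC =====
-- Pre_ excludes the empty matrix, where A returns -1 (an int, not a list of region sizes),
-- and ragged matrices with a row shorter than the first row, where A raises IndexError.
def Pre_pondSizes (mat : List (List Int)) : Prop :=
  mat ≠ [] ∧ ∀ row ∈ mat, (mat.headD []).length ≤ row.length
instance (mat : List (List Int)) : Decidable (Pre_pondSizes mat) := by
  unfold Pre_pondSizes; infer_instance

def pvWitness_pondSizes : List (List Int) := [[0, 1], [1, 0]]

def Spec_pondSizes (mat : List (List Int)) (out : List Int) : Prop := out = pondSizes_alt mat
instance (mat : List (List Int)) (out : List Int) : Decidable (Spec_pondSizes mat out) := by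
  unfold Spec_pondSizes; infer_instance

-- ===== CLAIM (what is proved, stated in full; the proofs are below) =====
def Claim_equal_pondSizes : Prop := ∀ (mat : List (List Int)), Dom_pondSizes mat →
  Pre_pondSizes mat → Spec_pondSizes mat (pondSizes mat)

-- ===== LEMMAS AND PROOFS =====

-- the nine neighbour offsets in A's visiting order (and B's popping order)
def pvNbrs (r c : Int) : List (Int × Int) :=
  [(r + -1, c + -1), (r + -1, c + 0), (r + -1, c + 1),
   (r + 0, c + -1), (r + 0, c + 0), (r + 0, c + 1),
   (r + 1, c + -1), (r + 1, c + 0), (r + 1, c + 1)]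

-- unfolding of calculateSize at succ fuel, neighbours flattened to one list
lemma pv_calc_succ (mat : List (List Int)) (f : Nat) (row col : Int) (v : List (List Bool)) :
    calculateSize mat (f + 1) row col v =
      if pvBadA mat row col v then (0, v)
      else (pvNbrs row col).foldl (fun acc p =>
        let q := calculateSize mat f p.1 p.2 acc.2
        (acc.1 + q.1, q.2)) (1, pvVisSet v row col) := by
  rfl

-- the push loops prepend exactly the nine neighbours in order
lemma pv_push_eq (r c : Int) (rest : List (Int × Int)) :
    (([(1 : Int), 0, -1]).foldl (fun st dr =>
      ([(1 : Int), 0, -1]).foldl (fun st dc => (r + dr, c + dc) :: st) st) rest) =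
      pvNbrs r c ++ rest := by
  rfl

-- shape of A's visited matrix
def pvShape (mat : List (List Int)) (v : List (List Bool)) : Prop :=
  v.length = mat.length ∧
    ∀ n : Nat, n < v.length → (v.getD n []).length = (mat.headD []).length

-- the A-side visited matrix and the B-side visited set mark the same in-range cells
def pvRel (mat : List (List Int)) (v : List (List Bool)) (s : PySem.Set (Int × Int)) : Prop :=
  ∀ r c : Int, 0 ≤ r → r < (mat.length : Int) → 0 ≤ c → c < ((mat.headD []).length : Int) →
    (pvVisGet v r c = true ↔ (r, c) ∈ s)

-- unmarked count of A's visited matrix (shows the fuel never runs out)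
def pvMeasure (mat : List (List Int)) (v : List (List Bool)) : Nat :=
  (pvCellsB mat).countP (fun p => !pvVisGet v p.1 p.2)

lemma pv_measure_le (mat : List (List Int)) (v : List (List Bool)) :
    pvMeasure mat v ≤ mat.length * (mat.headD []).length := by
  have h1 := List.countP_le_length (l := pvCellsB mat) (p := fun p => !pvVisGet v p.1 p.2)
  have h2 : (pvCellsB mat).length = mat.length * (mat.headD []).length := by
    simp [pvCellsB, List.length_flatMap,
      List.map_const', List.sum_replicate]
  rw [pvMeasure, ← h2]; exact h1

lemma pv_visGet_set_self (v : List (List Bool)) (r c : Int)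
    (hn : r.toNat < v.length) (hm : c.toNat < (v.getD r.toNat []).length) :
    pvVisGet (pvVisSet v r c) r c = true := by
  unfold pvVisGet pvVisSet
  have hv : v[r.toNat]? = some v[r.toNat] := List.getElem?_eq_getElem hn
  have hm' : c.toNat < v[r.toNat].length := by
    simpa [List.getD_eq_getElem?_getD, hv] using hm
  simp [List.getD_eq_getElem?_getD, hv, hm']

lemma pv_visGet_set_other (v : List (List Bool)) (r c i j : Int)
    (h : i.toNat ≠ r.toNat ∨ j.toNat ≠ c.toNat) :
    pvVisGet (pvVisSet v r c) i j = pvVisGet v i j := by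
  unfold pvVisGet pvVisSet
  simp only [List.getD_eq_getElem?_getD, List.getElem?_modify]
  rcases h with h | h
  · simp [Ne.symm h]
  · by_cases hn : r.toNat = i.toNat
    · rw [hn]
      cases hv : v[i.toNat]? with
      | none => simp
      | some row => simp [Ne.symm h]
    · simp [hn]

lemma pv_visGet_true_bounds {v : List (List Bool)} {i j : Int}
    (h : pvVisGet v i j = true) :
    i.toNat < v.length ∧ j.toNat < (v.getD i.toNat []).length := by
  unfold pvVisGet at h
  constructor
  · by_contra h'
    have hrow : v.getD i.toNat [] = [] := by
      rw [List.getD_eq_getElem?_getD, List.getElem?_eq_none (by omega : v.length ≤ i.toNat)]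
      rfl
    rw [hrow] at h
    simp at h
  · by_contra h'
    rw [List.getD_eq_getElem?_getD,
      List.getElem?_eq_none (by omega : (v.getD i.toNat []).length ≤ j.toNat)] at h
    simp at h

lemma pv_visGet_set_mono {v : List (List Bool)} {i j : Int} (r c : Int)
    (h : pvVisGet v i j = true) : pvVisGet (pvVisSet v r c) i j = true := by
  by_cases hij : i.toNat = r.toNat ∧ j.toNat = c.toNat
  · obtain ⟨h1, h2⟩ := hij
    obtain ⟨hb1, hb2⟩ := pv_visGet_true_bounds h
    have := pv_visGet_set_self v r c (by omega) (by rw [← h1, ← h2]; exact hb2)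
    unfold pvVisGet pvVisSet at this ⊢
    rw [h1, h2]; exact this
  · rw [pv_visGet_set_other v r c i j (by tauto)]; exact h

lemma pv_shape_set (mat : List (List Int)) (v : List (List Bool)) (r c : Int)
    (h : pvShape mat v) : pvShape mat (pvVisSet v r c) := by
  obtain ⟨h1, h2⟩ := h
  refine ⟨by simpa [pvVisSet] using h1, fun n hn => ?_⟩
  rw [pvVisSet, List.length_modify] at hn
  have := h2 n hn
  rw [pvVisSet, List.getD_eq_getElem?_getD, List.getElem?_modify]
  cases hv : v[n]? with
  | none => rw [List.getD_eq_getElem?_getD, hv] at this; simpa using this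
  | some row =>
    rw [List.getD_eq_getElem?_getD, hv] at this
    by_cases hr : r.toNat = n <;> simpa [hr] using this

lemma pv_measure_set_le (mat : List (List Int)) (v : List (List Bool)) (r c : Int) :
    pvMeasure mat (pvVisSet v r c) ≤ pvMeasure mat v := by
  refine List.countP_mono_left (fun p _ h => ?_)
  simp only [Bool.not_eq_true'] at h ⊢
  by_contra h'
  have : pvVisGet v p.1 p.2 = true := by revert h'; cases pvVisGet v p.1 p.2 <;> simp
  rw [pv_visGet_set_mono r c this] at h
  cases h

-- unpacked form of a false guard
lemma pv_badA_false {mat : List (List Int)} {r c : Int} {v : List (List Bool)}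
    (hbad : pvBadA mat r c v = false) :
    0 ≤ r ∧ r < (mat.length : Int) ∧ 0 ≤ c ∧ c < ((mat.headD []).length : Int) ∧
      pvVisGet v r c = false ∧ (mat.getD r.toNat []).getD c.toNat 0 = 0 := by
  simp only [pvBadA, Bool.or_eq_false_iff, decide_eq_false_iff_not, not_lt, not_le,
    not_not] at hbad
  obtain ⟨⟨⟨⟨⟨h1, h2⟩, h3⟩, h4⟩, h5⟩, h6⟩ := hbad
  exact ⟨h1, by omega, h2, by omega, h5, h6⟩

lemma pv_measure_set_lt (mat : List (List Int)) (v : List (List Bool)) (r c : Int)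
    (hsh : pvShape mat v) (hbad : pvBadA mat r c v = false) :
    pvMeasure mat (pvVisSet v r c) < pvMeasure mat v := by
  obtain ⟨h1, h2, h3, h4, h5, -⟩ := pv_badA_false hbad
  have hn : r.toNat < v.length := by rw [hsh.1]; omega
  have hm : c.toNat < (v.getD r.toNat []).length := by rw [hsh.2 r.toNat hn]; omega
  refine pv_countP_lt (fun p _ h => ?_) (pv_mem_cellsB h1 h2 h3 h4) (by simp [h5]) ?_
  · simp only [Bool.not_eq_true'] at h ⊢
    by_contra h'
    have : pvVisGet v p.1 p.2 = true := by revert h'; cases pvVisGet v p.1 p.2 <;> simp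
    rw [pv_visGet_set_mono r c this] at h
    cases h
  · simp [pv_visGet_set_self v r c hn hm]

-- calculateSize only marks cells: shape is preserved and the measure does not grow
lemma pv_calc_mono (mat : List (List Int)) (f : Nat) :
    ∀ (row col : Int) (v : List (List Bool)), pvShape mat v →
      pvShape mat (calculateSize mat f row col v).2 ∧
      pvMeasure mat (calculateSize mat f row col v).2 ≤ pvMeasure mat v := by
  induction f with
  | zero => exact fun row col v h => ⟨h, le_refl _⟩
  | succ f ih =>
    intro row col v h
    rw [pv_calc_succ]
    by_cases hbad : pvBadA mat row col v
    · simp only [hbad, if_true]; exact ⟨h, le_refl _⟩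
    rw [Bool.not_eq_true] at hbad
    simp only [hbad, Bool.false_eq_true, if_false]
    have fold : ∀ (qs : List (Int × Int)) (acc : Int × List (List Bool)), pvShape mat acc.2 →
        pvShape mat (qs.foldl (fun acc p =>
          let q := calculateSize mat f p.1 p.2 acc.2
          (acc.1 + q.1, q.2)) acc).2 ∧
        pvMeasure mat (qs.foldl (fun acc p =>
          let q := calculateSize mat f p.1 p.2 acc.2
          (acc.1 + q.1, q.2)) acc).2 ≤ pvMeasure mat acc.2 := by
      intro qs
      induction qs with
      | nil => exact fun acc h => ⟨h, le_refl _⟩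
      | cons q qs ihq =>
        intro acc hacc
        simp only [List.foldl_cons]
        obtain ⟨hs1, hm1⟩ := ih q.1 q.2 acc.2 hacc
        obtain ⟨hs2, hm2⟩ := ihq (acc.1 + (calculateSize mat f q.1 q.2 acc.2).1,
          (calculateSize mat f q.1 q.2 acc.2).2) hs1
        exact ⟨hs2, le_trans hm2 hm1⟩
    obtain ⟨hs, hm⟩ := fold (pvNbrs row col) (1, pvVisSet v row col)
      (pv_shape_set mat v row col h)
    exact ⟨hs, le_trans hm (pv_measure_set_le mat v row col)⟩

-- equal guards on related states
lemma pv_bad_iff (mat : List (List Int)) (v : List (List Bool)) (s : PySem.Set (Int × Int))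
    (r c : Int) (hrel : pvRel mat v s) : pvBadA mat r c v = pvBadB mat r c s := by
  unfold pvBadA pvBadB
  by_cases h1 : r < 0
  · rw [decide_eq_true h1]; simp
  by_cases h2 : c < 0
  · rw [decide_eq_true h2]; simp
  by_cases h3 : (mat.length : Int) ≤ r
  · rw [decide_eq_true h3]; simp
  by_cases h4 : ((mat.headD []).length : Int) ≤ c
  · rw [decide_eq_true h4]; simp
  have hiff := hrel r c (by omega) (by omega) (by omega) (by omega)
  have hvc : pvVisGet v r c = PySem.Set.contains s (r, c) := by
    cases hv : pvVisGet v r c with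
    | true => exact ((PySem.Set.contains_iff s (r, c)).2 (hiff.1 hv)).symm
    | false =>
      cases hc : PySem.Set.contains s (r, c) with
      | true =>
        rw [hiff.2 ((PySem.Set.contains_iff s (r, c)).1 hc)] at hv
        cases hv
      | false => rfl
  rw [hvc]

-- a related pair stays related when the same in-range cell is marked on both sides
lemma pv_rel_set (mat : List (List Int)) (v : List (List Bool)) (s : PySem.Set (Int × Int))
    (r c : Int) (hrel : pvRel mat v s) (hsh : pvShape mat v)
    (hbad : pvBadA mat r c v = false) :
    pvRel mat (pvVisSet v r c) (PySem.Set.add s (r, c)) := by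
  obtain ⟨h1, h2, h3, h4, -, -⟩ := pv_badA_false hbad
  intro i j hi0 hi hj0 hj
  rw [PySem.Set.mem_add]
  by_cases hij : i = r ∧ j = c
  · obtain ⟨rfl, rfl⟩ := hij
    have hn : i.toNat < v.length := by rw [hsh.1]; omega
    have hm : j.toNat < (v.getD i.toNat []).length := by rw [hsh.2 i.toNat hn]; omega
    simp [pv_visGet_set_self v i j hn hm]
  · have hne : i.toNat ≠ r.toNat ∨ j.toNat ≠ c.toNat := by
      rcases not_and_or.1 hij with h | h
      · left; omega
      · right; omega
    rw [pv_visGet_set_other v r c i j hne]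
    have := hrel i j hi0 hi hj0 hj
    rw [this]
    constructor
    · exact fun h => Or.inl h
    · rintro (h | h)
      · exact h
      · exfalso; rcases hne with hne | hne <;>
          (injection h with ha hb; subst ha; subst hb; omega)

-- the measure is zero exactly when every in-range cell is marked
lemma pv_measure_zero {mat : List (List Int)} {v : List (List Bool)}
    (h : pvMeasure mat v = 0) {r c : Int} (h1 : 0 ≤ r) (h2 : r < (mat.length : Int))
    (h3 : 0 ≤ c) (h4 : c < ((mat.headD []).length : Int)) : pvVisGet v r c = true := by
  have := List.countP_eq_zero.1 h _ (pv_mem_cellsB h1 h2 h3 h4)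
  simpa using this

-- unfolding equations for pondLoop
lemma pv_loop_nil (mat : List (List Int)) (s : PySem.Set (Int × Int)) (size : Int) :
    pondLoop mat s size [] = (size, s) := by
  rw [pondLoop]

lemma pv_loop_skip (mat : List (List Int)) (s : PySem.Set (Int × Int)) (size : Int)
    (r c : Int) (rest : List (Int × Int)) (h : pvBadB mat r c s = true) :
    pondLoop mat s size ((r, c) :: rest) = pondLoop mat s size rest := by
  rw [pondLoop]; simp [h]

lemma pv_loop_mark (mat : List (List Int)) (s : PySem.Set (Int × Int)) (size : Int)
    (r c : Int) (rest : List (Int × Int)) (h : pvBadB mat r c s = false) :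
    pondLoop mat s size ((r, c) :: rest) =
      pondLoop mat (PySem.Set.add s (r, c)) (size + 1) (pvNbrs r c ++ rest) := by
  rw [pondLoop]; rw [pv_push_eq]; simp [h]

-- the simulation: popping one cell from the stack does what one call of calculateSize does
lemma pv_sim (mat : List (List Int)) (f : Nat) :
    ∀ (row col : Int) (v : List (List Bool)) (s : PySem.Set (Int × Int)) (size : Int)
      (st : List (Int × Int)), pvShape mat v → pvRel mat v s → pvMeasure mat v ≤ f →
      ∃ s', pvRel mat (calculateSize mat f row col v).2 s' ∧
        pondLoop mat s size ((row, col) :: st) =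
          pondLoop mat s' (size + (calculateSize mat f row col v).1) st := by
  induction f with
  | zero =>
    intro row col v s size st hsh hrel hmeas
    have hm0 : pvMeasure mat v = 0 := by omega
    have hbad : pvBadB mat row col s = true := by
      by_contra hb
      rw [Bool.not_eq_true] at hb
      obtain ⟨h1, h2, h3, h4, h5, -⟩ := pv_badA_false (by rw [pv_bad_iff mat v s _ _ hrel]; exact hb)
      rw [pv_measure_zero hm0 h1 h2 h3 h4] at h5
      cases h5
    refine ⟨s, hrel, ?_⟩
    rw [pv_loop_skip mat s size row col st hbad]
    norm_num [calculateSize]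
  | succ f ih =>
    intro row col v s size st hsh hrel hmeas
    rw [pv_calc_succ]
    cases hbad : pvBadA mat row col v with
    | true =>
      refine ⟨s, by simp only [hbad, if_true]; exact hrel, ?_⟩
      rw [pv_loop_skip mat s size row col st (by rw [← pv_bad_iff mat v s _ _ hrel]; exact hbad)]
      simp only [hbad, if_true]
      norm_num
    | false =>
      simp only [hbad, Bool.false_eq_true, if_false]
      have hrel1 := pv_rel_set mat v s row col hrel hsh hbad
      have hsh1 := pv_shape_set mat v row col hsh
      have hmeas1 : pvMeasure mat (pvVisSet v row col) ≤ f := by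
        have := pv_measure_set_lt mat v row col hsh hbad
        omega
      have fold : ∀ (qs : List (Int × Int)) (acc : Int × List (List Bool))
          (s2 : PySem.Set (Int × Int)) (st : List (Int × Int)) (sz : Int),
          pvShape mat acc.2 → pvRel mat acc.2 s2 → pvMeasure mat acc.2 ≤ f →
          ∃ s', pvRel mat (qs.foldl (fun acc p =>
              let q := calculateSize mat f p.1 p.2 acc.2
              (acc.1 + q.1, q.2)) acc).2 s' ∧
            pondLoop mat s2 sz (qs ++ st) =
              pondLoop mat s' (sz + ((qs.foldl (fun acc p =>
                let q := calculateSize mat f p.1 p.2 acc.2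
                (acc.1 + q.1, q.2)) acc).1 - acc.1)) st := by
        intro qs
        induction qs with
        | nil =>
          intro acc s2 st sz hs hr hm
          refine ⟨s2, hr, ?_⟩
          simp
        | cons q qs ihq =>
          intro acc s2 st sz hs hr hm
          obtain ⟨s1, hrel1', heq1⟩ := ih q.1 q.2 acc.2 s2 sz (qs ++ st) hs hr hm
          obtain ⟨hsh1', hm1'⟩ := pv_calc_mono mat f q.1 q.2 acc.2 hs
          obtain ⟨s', hrel2', heq2⟩ := ihq (acc.1 + (calculateSize mat f q.1 q.2 acc.2).1,
            (calculateSize mat f q.1 q.2 acc.2).2) s1 st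
            (sz + (calculateSize mat f q.1 q.2 acc.2).1) hsh1' hrel1' (le_trans hm1' hm)
          refine ⟨s', hrel2', ?_⟩
          simp only [List.foldl_cons]
          rw [List.cons_append] at *
          rw [heq1, heq2]
          congr 1
          ring
      obtain ⟨s', hrel', heq⟩ := fold (pvNbrs row col) (1, pvVisSet v row col)
        (PySem.Set.add s (row, col)) st (size + 1) hsh1 hrel1 hmeas1
      refine ⟨s', hrel', ?_⟩
      rw [pv_loop_mark mat s size row col st (by rw [← pv_bad_iff mat v s _ _ hrel]; exact hbad)]
      rw [heq]
      congr 1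
      ring

-- flattening of the two nested loops over rows and columns into one fold over cells
lemma pv_foldl_foldl {α β σ : Type} (l1 : List α) (l2 : List β) (g : σ → α → β → σ) (a0 : σ) :
    l1.foldl (fun a i => l2.foldl (fun a j => g a i j) a) a0
      = (l1.flatMap (fun i => l2.map (Prod.mk i))).foldl (fun a p => g a p.1 p.2) a0 := by
  induction l1 generalizing a0 with
  | nil => rfl
  | cons x l ihl => simp [List.foldl_append, List.foldl_map, ihl]

-- the two outer scans produce the same result list on related states
lemma pv_outer (mat : List (List Int)) :
    ∀ (cells : List (Int × Int)) (res : List Int) (v : List (List Bool))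
      (s : PySem.Set (Int × Int)), pvShape mat v → pvRel mat v s →
      (∀ p ∈ cells, 0 ≤ p.1 ∧ p.1 < (mat.length : Int) ∧ 0 ≤ p.2 ∧
        p.2 < ((mat.headD []).length : Int)) →
      (cells.foldl (fun st p =>
          if !pvVisGet st.2 p.1 p.2 && ((mat.getD p.1.toNat []).getD p.2.toNat 0 == 0) then
            let q := calculateSize mat (mat.length * (mat.headD []).length) p.1 p.2 st.2
            (st.1 ++ [q.1], q.2)
          else st) (res, v)).1
        = (cells.foldl (fun st p =>
            if !PySem.Set.contains st.2 (p.1, p.2) &&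
                ((mat.getD p.1.toNat []).getD p.2.toNat 0 == 0) then
              let q := pondLoop mat st.2 0 [(p.1, p.2)]
              (st.1 ++ [q.1], q.2)
            else st) (res, s)).1 := by
  intro cells
  induction cells with
  | nil => intro res v s _ _ _; rfl
  | cons p cells ihc =>
    intro res v s hsh hrel hbnd
    obtain ⟨h1, h2, h3, h4⟩ := hbnd p List.mem_cons_self
    have hvis : pvVisGet v p.1 p.2 = PySem.Set.contains s (p.1, p.2) := by
      cases hv : pvVisGet v p.1 p.2 with
      | true => exact ((PySem.Set.contains_iff s (p.1, p.2)).2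
          ((hrel p.1 p.2 h1 h2 h3 h4).1 hv)).symm
      | false =>
        cases hc : PySem.Set.contains s (p.1, p.2) with
        | true =>
          rw [(hrel p.1 p.2 h1 h2 h3 h4).2
            ((PySem.Set.contains_iff s (p.1, p.2)).1 hc)] at hv
          cases hv
        | false => rfl
    simp only [List.foldl_cons, hvis]
    cases hcond : (!PySem.Set.contains s (p.1, p.2) &&
        ((mat.getD p.1.toNat []).getD p.2.toNat 0 == 0)) with
    | false =>
      simp only [Bool.false_eq_true, if_false]
      exact ihc res v s hsh hrel (fun q hq => hbnd q (List.mem_cons_of_mem _ hq))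
    | true =>
      simp only [if_true]
      obtain ⟨s', hrel', heq⟩ := pv_sim mat (mat.length * (mat.headD []).length) p.1 p.2 v s 0 []
        hsh hrel (pv_measure_le mat v)
      rw [pv_loop_nil] at heq
      rw [heq]
      obtain ⟨hsh', -⟩ := pv_calc_mono mat (mat.length * (mat.headD []).length) p.1 p.2 v hsh
      simpa using ihc
        (res ++ [(calculateSize mat (mat.length * (mat.headD []).length) p.1 p.2 v).1])
        (calculateSize mat (mat.length * (mat.headD []).length) p.1 p.2 v).2 s' hsh' hrel'
        (fun q hq => hbnd q (List.mem_cons_of_mem _ hq))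

-- the initial visited matrix is all-false and has the grid shape
lemma pv_allfalse_get (l : List (List Bool)) (hl : ∀ row ∈ l, ∀ b ∈ row, b = false)
    (r c : Int) : pvVisGet l r c = false := by
  unfold pvVisGet
  rcases h : l[r.toNat]? with _ | row
  · simp [List.getD_eq_getElem?_getD, h]
  · rcases h2 : row[c.toNat]? with _ | b
    · simp [List.getD_eq_getElem?_getD, h, h2]
    · have := hl row (List.mem_of_getElem? h) b (List.mem_of_getElem? h2)
      simp [List.getD_eq_getElem?_getD, h, h2, this]

lemma pv_init_shape (mat : List (List Int)) :
    pvShape mat ((PySem.List.pyRange 0 (mat.length : Int) 1).map (fun _ =>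
      (PySem.List.pyRange 0 ((mat.headD []).length : Int) 1).map (fun _ => false))) := by
  constructor
  · simp [PySem.List.length_pyRange_one]
  · intro n hn
    have hn' : n < ((PySem.List.pyRange 0 (mat.length : Int) 1).map (fun _ =>
        (PySem.List.pyRange 0 ((mat.headD []).length : Int) 1).map (fun _ => false))).length :=
      hn
    rw [List.getD_eq_getElem?_getD, List.getElem?_eq_getElem hn', Option.getD_some,
      List.getElem_map]
    simp [PySem.List.length_pyRange_one]

lemma pv_init_rel (mat : List (List Int)) :
    pvRel mat ((PySem.List.pyRange 0 (mat.length : Int) 1).map (fun _ =>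
      (PySem.List.pyRange 0 ((mat.headD []).length : Int) 1).map (fun _ => false)))
      (PySem.Set.empty : PySem.Set (Int × Int)) := by
  intro r c _ _ _ _
  rw [pv_allfalse_get _ (fun row hrow b hb => ?_) r c]
  · simp [PySem.Set.empty]
  · obtain ⟨-, -, rfl⟩ := List.mem_map.1 hrow
    obtain ⟨-, -, rfl⟩ := List.mem_map.1 hb
    rfl

-- ===== VERDICT (by name: the statement is the Claim_ definition above) =====
theorem pondSizes_spec : Claim_equal_pondSizes := by
  intro mat _ hpre
  unfold Spec_pondSizes
  obtain ⟨hne, -⟩ := hpre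
  have hlen : mat.length ≠ 0 := by simpa using hne
  unfold pondSizes pondSizes_alt
  rw [if_neg hlen, if_neg hlen]
  dsimp only
  rw [pv_foldl_foldl (PySem.List.pyRange 0 (mat.length : Int) 1)
    (PySem.List.pyRange 0 ((mat.headD []).length : Int) 1)
    (fun st (row : Int) (col : Int) =>
      if !pvVisGet st.2 row col && ((mat.getD row.toNat []).getD col.toNat 0 == 0) then
        let p := calculateSize mat (mat.length * (mat.headD []).length) row col st.2
        (st.1 ++ [p.1], p.2)
      else st)]
  rw [pv_foldl_foldl (PySem.List.pyRange 0 (mat.length : Int) 1)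
    (PySem.List.pyRange 0 ((mat.headD []).length : Int) 1)
    (fun st (row : Int) (col : Int) =>
      if !PySem.Set.contains st.2 (row, col) &&
          ((mat.getD row.toNat []).getD col.toNat 0 == 0) then
        let p := pondLoop mat st.2 0 [(row, col)]
        (st.1 ++ [p.1], p.2)
      else st)]
  refine pv_outer mat _ [] _ _ (pv_init_shape mat) (pv_init_rel mat) ?_
  intro p hp
  simp only [List.mem_flatMap, List.mem_map, PySem.List.mem_pyRange_one] at hp
  obtain ⟨i, ⟨hi0, hi⟩, j, ⟨hj0, hj⟩, rfl⟩ := hp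
  exact ⟨hi0, hi, hj0, hj⟩
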